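-- pv_equiv track=rewrite | github.com/sangjinCHOI/algostudy | 0227/sangjin/파일명정렬/s1.py | solution
-- ===== SOURCE A (Python) =====
-- def solution(files):
--     answer = []
--     for file in files:
--         head, number, tail = '', '', ''
--         check_head = 1
--         for i in range(len(file)):
--             if check_head and not file[i].isdigit():
--                 head += file[i]
--             elif file[i].isdigit():
--                 check_head = 0
--                 number += file[i]
--             else:
--                 tail = file[i:]
--                 break
--         answer.append([head, number, tail])
--
--     answer.sort(key=lambda x: (x[0].lower(), int(x[1])))
--     answer = [''.join(a) for a in answer]
--     return answer
-- ===== SOURCE B (Python) =====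
-- def solution(files):
--     # Sort the original filenames directly by a (lowercased head, numeric value) key;
--     # no triple list, no rejoining.
--     def key(f):
--         n = len(f)
--         i = 0
--         while i < n and not f[i].isdigit():
--             i += 1
--         j = i
--         while j < n and f[j].isdigit():
--             j += 1
--         return (f[:i].lower(), int(f[i:j]))
--     return sorted(files, key=key)
-- ===== Notes on version B (the rewrite author's own statement) =====
-- stated objective: simpler
-- what changed: B sorts the original filenames directly with a key function (lowercased non-digit prefix, value of the first digit run) instead of materializing [head, number, tail] triples, sorting those, and rejoining them; it relies on head+number+tail always equalling the filename.
import Mathlib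
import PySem

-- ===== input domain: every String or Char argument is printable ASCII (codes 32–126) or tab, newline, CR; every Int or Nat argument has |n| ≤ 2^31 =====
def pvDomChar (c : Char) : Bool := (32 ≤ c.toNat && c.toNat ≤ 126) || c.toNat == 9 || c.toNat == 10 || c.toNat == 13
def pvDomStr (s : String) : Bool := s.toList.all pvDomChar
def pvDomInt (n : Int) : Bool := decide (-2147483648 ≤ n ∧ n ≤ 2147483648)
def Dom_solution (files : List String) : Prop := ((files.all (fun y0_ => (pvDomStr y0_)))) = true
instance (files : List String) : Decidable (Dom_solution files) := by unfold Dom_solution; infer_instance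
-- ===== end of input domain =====

-- B sorts the original filenames directly by a (lowercased head, numeric part) key instead of
-- building [head, number, tail] triples, sorting them and rejoining (objective: simpler).


-- ===== PORT A =====
-- inner character loop of A: state (head, number, check_head); iterating the index over
-- file is recursion over the remaining characters, 'tail = file[i:]; break' returns the suffix
def aLoop (cs : List Char) (head number : List Char) (check : Bool) :
    List Char × List Char × List Char :=
  match cs with
  | [] => (head, number, [])
  | c :: rest =>
    if check && !(PySem.Chars.isdigit c) then aLoop rest (head ++ [c]) number check
    else if PySem.Chars.isdigit c then aLoop rest head (number ++ [c]) false
    else (head, number, c :: rest)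

def solution (files : List String) : List String :=
  -- answer = [[head, number, tail] for file in files]  (a 3-string list → a triple)
  let answer := files.map (fun file => aLoop file.toList [] [] true)
  -- answer.sort(key=lambda x: (x[0].lower(), int(x[1])));  int('') raises outside Pre_, ported as getD 0 there
  let answer := PySem.List.sorted2 answer
      (fun x => PySem.Chars.lower x.1) (fun x => (PySem.Int.ofChars? x.2.1).getD 0)
  -- answer = [''.join(a) for a in answer]
  answer.map (fun a => String.ofList (a.1 ++ a.2.1 ++ a.2.2))

-- ===== PORT B =====
-- first while loop of B's key: split off the maximal non-digit prefix (f[:i], f[i:])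
def bScan1 (cs : List Char) : List Char × List Char :=
  match cs with
  | [] => ([], [])
  | c :: rest =>
    if PySem.Chars.isdigit c then ([], c :: rest)
    else
      let pr := bScan1 rest
      (c :: pr.1, pr.2)

-- second while loop of B's key: the maximal digit prefix (f[i:j])
def bScan2 (cs : List Char) : List Char :=
  match cs with
  | [] => []
  | c :: rest => if PySem.Chars.isdigit c then c :: bScan2 rest else []

def solution_alt (files : List String) : List String :=
  -- return sorted(files, key=lambda f: (f[:i].lower(), int(f[i:j])));  int('') raises outside Pre_, getD 0 there
  PySem.List.sorted2 files
    (fun f => PySem.Chars.lower (bScan1 f.toList).1)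
    (fun f => (PySem.Int.ofChars? (bScan2 (bScan1 f.toList).2)).getD 0)

-- ===== PRECONDITION & SPEC =====
-- A's sort key computes int(number): on a file with no digit this is int('') and raises ValueError
-- (so does B's int(f[i:j])); Pre_ admits exactly the lists whose files each contain a digit.
def Pre_solution (files : List String) : Prop :=
  (files.all (fun f => f.toList.any PySem.Chars.isdigit)) = true
instance (files : List String) : Decidable (Pre_solution files) := by
  unfold Pre_solution; infer_instance

def pvWitness_solution : List String := ["img12.png", "IMG10.PNG", "img2.JPG", "F-5 x"]

def Spec_solution (files : List String) (out : List String) : Prop := out = solution_alt files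
instance (files : List String) (out : List String) : Decidable (Spec_solution files out) := by unfold Spec_solution; infer_instance

-- ===== CLAIM (what is proved, stated in full; the proofs are below) =====
def Claim_equal_solution : Prop := ∀ (files : List String), Dom_solution files → Pre_solution files → Spec_solution files (solution files)

-- ===== LEMMAS AND PROOFS =====

-- once check_head is 0, head is frozen and number collects the maximal digit run (= B's second scan)
theorem aLoop_false (cs : List Char) : ∀ (h n : List Char),
    aLoop cs h n false = (h, n ++ bScan2 cs, (aLoop cs h n false).2.2) := by
  induction cs with
  | nil => intro h n; simp [aLoop, bScan2]
  | cons c rest ih =>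
    intro h n
    by_cases hd : PySem.Chars.isdigit c = true
    · simpa [aLoop, bScan2, hd] using ih h (n ++ [c])
    · simp [aLoop, bScan2, hd]

-- from the start, A's head and number are exactly B's two scans
theorem aLoop_true (cs : List Char) : ∀ (h : List Char),
    aLoop cs h [] true = (h ++ (bScan1 cs).1, bScan2 (bScan1 cs).2,
      (aLoop cs h [] true).2.2) := by
  induction cs with
  | nil => intro h; simp [aLoop, bScan1, bScan2]
  | cons c rest ih =>
    intro h
    by_cases hd : PySem.Chars.isdigit c = true
    · simpa [aLoop, bScan1, bScan2, hd] using aLoop_false rest h [c]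
    · simpa [aLoop, bScan1, bScan2, hd] using ih (h ++ [c])

-- A's loop only redistributes characters: the three pieces concatenate back to the input
theorem aLoop_concat_false (cs : List Char) : ∀ (h n : List Char),
    (aLoop cs h n false).1 ++ (aLoop cs h n false).2.1 ++ (aLoop cs h n false).2.2
      = h ++ n ++ cs := by
  induction cs with
  | nil => intro h n; simp [aLoop]
  | cons c rest ih =>
    intro h n
    by_cases hd : PySem.Chars.isdigit c = true
    · simpa [aLoop, hd] using ih h (n ++ [c])
    · simp [aLoop, hd]

theorem aLoop_concat (cs : List Char) : ∀ (h : List Char),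
    (aLoop cs h [] true).1 ++ (aLoop cs h [] true).2.1 ++ (aLoop cs h [] true).2.2
      = h ++ cs := by
  induction cs with
  | nil => intro h; simp [aLoop]
  | cons c rest ih =>
    intro h
    by_cases hd : PySem.Chars.isdigit c = true
    · simpa [aLoop, hd] using aLoop_concat_false rest h [c]
    · simpa [aLoop, hd] using ih (h ++ [c])

-- insertion into a mapped list is the mapped insertion (the stable sort's inner step)
theorem insertBy_map {α β : Type} (g : α → β) (before : β → β → Bool) (x : α) :
    ∀ (ys : List α),
      PySem.List.insertBy before (g x) (ys.map g) =
        (PySem.List.insertBy (fun a b => before (g a) (g b)) x ys).map g := by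
  intro ys
  induction ys with
  | nil => simp [PySem.List.insertBy]
  | cons y ys ih =>
    by_cases hb : before (g x) (g y) = true
    · simp [PySem.List.insertBy, hb]
    · simp [PySem.List.insertBy, hb, ih]

-- hence the whole insertion sort commutes with map
theorem foldl_insertBy_map {α β : Type} (g : α → β) (before : β → β → Bool) :
    ∀ (xs : List α) (acc : List α),
      List.foldl (fun acc x => PySem.List.insertBy before x acc) (acc.map g) (xs.map g) =
        (List.foldl (fun acc x => PySem.List.insertBy (fun a b => before (g a) (g b)) x acc)
          acc xs).map g := by
  intro xs
  induction xs with
  | nil => intro acc; simp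
  | cons x xs ih =>
    intro acc
    simp only [List.map_cons, List.foldl_cons, insertBy_map g before x acc]
    exact ih _

theorem sorted2_map {α β κ₁ κ₂ : Type} [LT κ₁] [DecidableLT κ₁] [LT κ₂] [DecidableLT κ₂]
    (g : α → β) (xs : List α) (k1 : β → κ₁) (k2 : β → κ₂) :
    PySem.List.sorted2 (xs.map g) k1 k2 =
      (PySem.List.sorted2 xs (fun x => k1 (g x)) (fun x => k2 (g x))).map g := by
  unfold PySem.List.sorted2
  simpa using foldl_insertBy_map g
    (fun a b => decide (k1 a < k1 b) || (!decide (k1 b < k1 a) && decide (k2 a < k2 b))) xs []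

theorem solution_eq_alt (files : List String) : solution files = solution_alt files := by
  show (PySem.List.sorted2 (files.map (fun file : String => aLoop file.toList [] [] true))
      (fun x => PySem.Chars.lower x.1) (fun x => (PySem.Int.ofChars? x.2.1).getD 0)).map
      (fun a => String.ofList (a.1 ++ a.2.1 ++ a.2.2)) = solution_alt files
  rw [sorted2_map (fun file : String => aLoop file.toList [] [] true), List.map_map]
  have hS : PySem.List.sorted2 files
      (fun f : String => PySem.Chars.lower (aLoop f.toList [] [] true).1)
      (fun f : String => (PySem.Int.ofChars? (aLoop f.toList [] [] true).2.1).getD 0)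
      = solution_alt files := by
    unfold solution_alt
    congr 1
    · funext f; rw [aLoop_true f.toList []]; simp
    · funext f; rw [aLoop_true f.toList []]
  rw [hS]
  have hjoin : ∀ f : String,
      String.ofList ((aLoop f.toList [] [] true).1 ++ (aLoop f.toList [] [] true).2.1 ++
        (aLoop f.toList [] [] true).2.2) = f := by
    intro f
    rw [aLoop_concat f.toList []]
    exact String.ofList_toList
  exact (List.map_congr_left fun f _ => hjoin f).trans (List.map_id _)

-- ===== VERDICT (by name: the statement is the Claim_ definition above) =====
theorem solution_spec : Claim_equal_solution := by
  intro files _ _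
  unfold Spec_solution
  exact solution_eq_alt files
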